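-- pv_equiv track=rewrite | github.com/luishrmc/bms | scripts/read_uplfp48_modbus.py | decode_error_code
-- ===== SOURCE A (Python) =====
-- def decode_error_code(raw: int) -> str:
--     error_bits = {
--         0x0001: "Erro de medição de tensão",
--         0x0002: "Erro de medição de temperatura",
--         0x0010: "Células desbalanceadas",
--     }
--     if raw == 0:
--         return "Sem erro"
--     return " | ".join(name for bit, name in error_bits.items() if raw & bit) or f"0x{raw:04X}"
-- ===== SOURCE B (Python) =====
-- def decode_error_code(raw: int) -> str:
--     if raw == 0:
--         return "Sem erro"
--     table = {
--         0x0001: "Erro de medição de tensão",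
--         0x0002: "Erro de medição de temperatura",
--         0x0010: "Células desbalanceadas",
--     }
--     # walk the set bits of raw itself (masked to the table's bit range),
--     # low to high, looking each bit value up in the table
--     m = raw & 0x0013
--     parts = []
--     v = 1
--     while m:
--         if m % 2:
--             name = table.get(v)
--             if name is not None:
--                 parts.append(name)
--         m //= 2
--         v *= 2
--     return " | ".join(parts) if parts else f"0x{raw:04X}"
-- ===== Notes on version B (the rewrite author's own statement) =====
-- stated objective: alternative
-- what changed: A scans the fixed error table and tests raw & bit for each entry; B instead walks the set bits of raw itself (masked to the table's bit range) from low to high, looking each bit value up in the table, so it never iterates the table.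
import Mathlib
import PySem

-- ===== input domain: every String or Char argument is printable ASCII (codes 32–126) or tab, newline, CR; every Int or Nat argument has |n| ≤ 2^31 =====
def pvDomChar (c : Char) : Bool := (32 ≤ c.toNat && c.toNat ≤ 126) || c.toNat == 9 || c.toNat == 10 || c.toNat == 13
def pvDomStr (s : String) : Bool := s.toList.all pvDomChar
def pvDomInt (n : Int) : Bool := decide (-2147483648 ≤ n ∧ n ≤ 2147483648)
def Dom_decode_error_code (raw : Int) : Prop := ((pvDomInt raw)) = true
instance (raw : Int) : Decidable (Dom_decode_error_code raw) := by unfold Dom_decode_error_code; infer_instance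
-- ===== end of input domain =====

-- B replaces A's scan of the error table (testing raw & bit for every table entry) by a walk
-- over the set bits of raw itself, looking each bit value up in the table; objective: alternative.

-- ===== PORT A =====
-- f"0x{raw:04X}" (A's copy): most-significant-first recursion
def hexDigit (n : Nat) : Char := if n < 10 then Char.ofNat (48 + n) else Char.ofNat (55 + n)

def hexChars (n : Nat) : List Char :=
  if _h : n < 16 then [hexDigit n] else hexChars (n / 16) ++ [hexDigit (n % 16)]
termination_by n
decreasing_by exact Nat.div_lt_self (by omega) (by omega)

def hexFmt (raw : Int) : String :=
  let ds := hexChars raw.natAbs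
  let sgn : List Char := if raw < 0 then ['-'] else []
  let pad := List.replicate (4 - (ds.length + sgn.length)) '0'
  String.ofList ('0' :: 'x' :: (sgn ++ pad ++ ds))

def decode_error_code (raw : Int) : String :=
  let error_bits : PySem.Dict Int String := PySem.Dict.mk
    [(0x0001, "Erro de medição de tensão"),
     (0x0002, "Erro de medição de temperatura"),
     (0x0010, "Células desbalanceadas")]
  if raw = 0 then "Sem erro"
  else
    let joined := PySem.Str.join " | "
      ((error_bits.items.filter (fun p => PySem.Int.band raw p.1 != 0)).map Prod.snd)
    if joined = "" then hexFmt raw else joined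

-- ===== PORT B =====
-- f"0x{raw:04X}" (B's copy): least-significant-first accumulation
def bHexDigits (n : Nat) (acc : List Char) : List Char :=
  if _h : n = 0 then acc
  else bHexDigits (n / 16) ("0123456789ABCDEF".toList.getD (n % 16) '0' :: acc)
termination_by n
decreasing_by exact Nat.div_lt_self (by omega) (by omega)

def bHexFmt (raw : Int) : String :=
  let ds := if raw.natAbs = 0 then ['0'] else bHexDigits raw.natAbs []
  let sgn : List Char := if raw < 0 then ['-'] else []
  String.ofList ('0' :: 'x' :: (sgn ++ List.replicate (4 - (sgn.length + ds.length)) '0' ++ ds))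

def bTable : PySem.Dict Int String := PySem.Dict.mk
  [(0x0001, "Erro de medição de tensão"),
   (0x0002, "Erro de medição de temperatura"),
   (0x0010, "Células desbalanceadas")]

-- the while loop of Source B; m = raw & 0x13 is provably nonnegative, so it is carried as a Nat
-- (Nat's % 2 and / 2 agree with Python's on nonnegative m)
def bWalk (m : Nat) (v : Int) (parts : List String) : List String :=
  if _h : m = 0 then parts
  else
    let parts' := if m % 2 = 1 then
        (match bTable.get? v with
         | some name => parts ++ [name]
         | none => parts)
      else parts
    bWalk (m / 2) (v * 2) parts'
termination_by m
decreasing_by exact Nat.div_lt_self (by omega) (by omega)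

def decode_error_code_alt (raw : Int) : String :=
  if raw = 0 then "Sem erro"
  else
    let m := (PySem.Int.band raw 0x0013).toNat
    let parts := bWalk m 1 []
    if parts = [] then bHexFmt raw else PySem.Str.join " | " parts

-- ===== PRECONDITION & SPEC =====
def Spec_decode_error_code (raw : Int) (out : String) : Prop := out = decode_error_code_alt raw
instance (raw : Int) (out : String) : Decidable (Spec_decode_error_code raw out) := by unfold Spec_decode_error_code; infer_instance

-- ===== CLAIM (what is proved, stated in full; the proofs are below) =====
def Claim_equal_decode_error_code : Prop := ∀ (raw : Int), Dom_decode_error_code raw → Spec_decode_error_code raw (decode_error_code raw)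

-- ===== LEMMAS AND PROOFS =====

-- a low mask sees only the low 5 bits
theorem nat_and_mod (n c : Nat) (hc : c < 32) : n &&& c = (n % 32) &&& c := by
  apply Nat.eq_of_testBit_eq
  intro i
  have h32 : (32 : Nat) = 2 ^ 5 := by norm_num
  rw [Nat.testBit_and, Nat.testBit_and, h32, Nat.testBit_mod_two_pow]
  by_cases hi : i < 5
  · simp [hi]
  · have hcb : c.testBit i = false :=
      Nat.testBit_lt_two_pow (lt_of_lt_of_le hc (by
        calc (32 : Nat) = 2 ^ 5 := by norm_num
          _ ≤ 2 ^ i := Nat.pow_le_pow_right (by norm_num) (by omega)))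
    simp [hcb]

theorem fin_sub_and : ∀ c < 32, ∀ t < 32, c - (c &&& t) = (31 - t) &&& c := by decide

-- Python's  raw & c  for 0 ≤ c < 32 depends only on raw % 32
theorem band_eq_mod_and (raw : Int) (c : Nat) (hc : c < 32) :
    PySem.Int.band raw (c : Int) = (((PySem.Int.mod raw 32).toNat &&& c : Nat) : Int) := by
  cases raw with
  | ofNat n =>
    have h1 : PySem.Int.band (Int.ofNat n) (c : Int) = ((n &&& c : Nat) : Int) := by
      exact_mod_cast PySem.Int.band_natCast n c
    have h2 : PySem.Int.mod (Int.ofNat n) 32 = ((n % 32 : Nat) : Int) := by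
      exact_mod_cast PySem.Int.mod_natCast n 32
    rw [h1, h2]
    have h3 : ((n % 32 : Nat) : Int).toNat = n % 32 := by omega
    rw [h3]
    exact_mod_cast nat_and_mod n c hc
  | negSucc m =>
    have hneg : ¬ (0 ≤ (Int.negSucc m)) := by
      rw [Int.negSucc_eq]; omega
    have hb : PySem.Int.band (Int.negSucc m) (c : Int) = ((c - (c &&& m) : Nat) : Int) := by
      unfold PySem.Int.band
      rw [if_neg hneg, if_pos (by positivity)]
      have hm' : (-(Int.negSucc m) - 1) = (m : Int) := by rw [Int.negSucc_eq]; ring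
      rw [hm']
      simp
    have hm : (PySem.Int.mod (Int.negSucc m) 32).toNat = 31 - m % 32 := by
      rw [PySem.Int.mod_eq_emod_of_pos (by norm_num), Int.negSucc_eq]
      omega
    rw [hb, hm]
    have e1 : c &&& m = c &&& (m % 32) := by
      rw [Nat.and_comm, Nat.and_comm c (m % 32)]
      exact nat_and_mod m c hc
    rw [e1, fin_sub_and c hc (m % 32) (Nat.mod_lt _ (by norm_num))]

theorem digit_eq : ∀ m < 16, "0123456789ABCDEF".toList.getD m '0' = hexDigit m := by decide

theorem bHexDigits_eq : ∀ n, ∀ acc : List Char, n ≠ 0 → bHexDigits n acc = hexChars n ++ acc := by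
  intro n
  induction n using Nat.strong_induction_on with
  | _ n ih =>
    intro acc hn
    rw [bHexDigits, dif_neg hn]
    by_cases h16 : n < 16
    · have hd : n / 16 = 0 := Nat.div_eq_of_lt h16
      have hm : n % 16 = n := Nat.mod_eq_of_lt h16
      rw [hd, hm, bHexDigits, dif_pos rfl, hexChars, dif_pos h16, digit_eq n h16]
      rfl
    · rw [ih (n / 16) (Nat.div_lt_self (by omega) (by omega)) _
          (by intro h; exact h16 (by omega))]
      conv_rhs => rw [hexChars, dif_neg h16]
      rw [digit_eq (n % 16) (Nat.mod_lt _ (by omega))]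
      simp

theorem hexFmt_eq (raw : Int) : bHexFmt raw = hexFmt raw := by
  unfold bHexFmt hexFmt
  by_cases h0 : raw.natAbs = 0
  · have hz : hexChars 0 = ['0'] := by
      rw [hexChars, dif_pos (by norm_num)]; rfl
    by_cases hneg : raw < 0
    · simp [h0, hz, hneg]
    · simp [h0, hz, hneg]
  · simp [h0, bHexDigits_eq raw.natAbs [] h0, Nat.add_comm]

-- ===== VERDICT (by name: the statement is the Claim_ definition above) =====
theorem decode_error_code_spec : Claim_equal_decode_error_code := by
  intro raw _
  unfold Spec_decode_error_code decode_error_code decode_error_code_alt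
  by_cases h0 : raw = 0
  · simp [h0]
  · rw [if_neg h0, if_neg h0]
    set r := (PySem.Int.mod raw 32).toNat with hr
    have hrlt : r < 32 := by
      have := PySem.Int.mod_lt raw (b := 32) (by norm_num)
      have := PySem.Int.mod_nonneg raw (b := 32) (by norm_num)
      omega
    have e1 := band_eq_mod_and raw 1 (by norm_num)
    have e2 := band_eq_mod_and raw 2 (by norm_num)
    have e16 := band_eq_mod_and raw 16 (by norm_num)
    have e19 := band_eq_mod_and raw 19 (by norm_num)
    rw [← hr] at e1 e2 e16 e19
    simp only [Nat.cast_one, Nat.cast_ofNat] at e1 e2 e16 e19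
    simp only [List.filter, e1, e2, e16, e19]
    interval_cases r <;>
      simp [bWalk, bTable, hexFmt_eq, PySem.Dict.get?, List.find?, Option.map,
            PySem.Str.join, PySem.Chars.join, List.intercalate]
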